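-- pv_equiv track=rewrite | github.com/Abercus/devianceminingthesis | DevianceMiningPipeline/declaretemplates_data.py | template_precedence_data
-- ===== SOURCE A (Python) =====
-- def template_precedence_data(trace, event_set):
--     """
--     precedence(A, B) template indicates that event B
--     should occur only if event A has occurred before.
--     :param trace:
--     :param event_set:
--     :return:
--     """
--
--     # exactly 2 event
--     assert (len(event_set) == 2)
--
--     violations = []
--     fulfillments = []
--
--     event_1 = event_set[0]
--     event_2 = event_set[1]
--
--     if event_2 in trace:
--         if event_1 in trace:
--             first_pos_event_1 = trace[event_1][0]
--             event_2_positions = trace[event_2]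
--             # All event B's, which are before first event A are violated. Every other is fulfilled.
--
--             for event_2_pos in event_2_positions:
--                 if event_2_pos < first_pos_event_1:
--                     # There is event
--                     violations.append(event_2_pos)
--                 else:
--                     fulfillments.append(event_2_pos)
--
--             if len(violations) > 0:
--                 return -1, False, fulfillments, violations
--             else:
--                 return len(fulfillments), False, fulfillments, violations
--
--         else:
--             # impossible because there has to be at least one event1 with event2
--             return -1, False, [], trace[event_2]
--
--     # Vacuously fulfilled
--     return 0, True, [], []
-- ===== SOURCE B (Python) =====
-- def template_precedence_data(trace, event_set):
--     """Alternative algorithm: instead of scanning with two accumulator lists,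
--     stably sort the event-2 positions by the boolean key (p < first), which
--     moves all violations after all fulfillments while keeping each group's
--     original order, then cut the sorted list at the fulfillment count."""
--     assert (len(event_set) == 2)
--     event_1, event_2 = event_set
--     if event_2 not in trace:
--         # Vacuously fulfilled
--         return 0, True, [], []
--     if event_1 not in trace:
--         return -1, False, [], trace[event_2]
--     first = trace[event_1][0]
--     positions = trace[event_2]
--     # stable sort by bool key: fulfillments (key False) first, violations after
--     keyed = sorted(positions, key=lambda p: p < first)
--     split = sum(p >= first for p in positions)
--     fulfillments, violations = keyed[:split], keyed[split:]
--     if violations: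
--         return -1, False, fulfillments, violations
--     return len(fulfillments), False, fulfillments, violations
-- ===== Notes on version B (the rewrite author's own statement) =====
-- stated objective: alternative
-- what changed: Replaces A's single forward scan with two append-accumulators by a sort-based partition: a stable sort of the event-2 positions under the boolean key (p < first) puts fulfillments before violations in original relative order, and the list is cut at the fulfillment count.
import Mathlib
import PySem

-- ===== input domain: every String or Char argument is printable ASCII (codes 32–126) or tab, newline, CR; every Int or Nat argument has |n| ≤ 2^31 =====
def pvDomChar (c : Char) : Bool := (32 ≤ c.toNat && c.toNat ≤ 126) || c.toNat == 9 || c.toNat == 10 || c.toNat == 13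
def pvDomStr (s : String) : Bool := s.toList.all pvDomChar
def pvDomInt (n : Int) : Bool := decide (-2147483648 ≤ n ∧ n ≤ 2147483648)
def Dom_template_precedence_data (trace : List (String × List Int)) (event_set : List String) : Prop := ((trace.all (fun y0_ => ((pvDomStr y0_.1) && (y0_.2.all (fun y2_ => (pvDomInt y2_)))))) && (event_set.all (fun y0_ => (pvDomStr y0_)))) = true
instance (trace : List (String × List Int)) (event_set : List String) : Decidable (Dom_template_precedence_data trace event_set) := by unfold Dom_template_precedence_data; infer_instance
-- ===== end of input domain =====

-- B partitions by a stable sort under the boolean key (p < first) plus a cut at the fulfillment count, instead of A's forward append-loop (alternative algorithm; not faster).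


-- dict lookup on the association list (first match = Python dict access; shared primitive)
def pvLookup (trace : List (String × List Int)) (k : String) : Option (List Int) :=
  (trace.find? (fun p => p.1 == k)).map (·.2)

-- ===== PORT A =====
def template_precedence_data (trace : List (String × List Int)) (event_set : List String) : Int × Bool × List Int × List Int :=
  let event_1 := event_set.getD 0 ""
  let event_2 := event_set.getD 1 ""
  match pvLookup trace event_2 with
  | some event_2_positions =>
    match pvLookup trace event_1 with
    | some l1 =>
      -- trace[event_1][0]; Pre_ guarantees l1 ≠ [] (Python raises IndexError otherwise)
      let first_pos_event_1 := l1.headD 0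
      let acc := event_2_positions.foldl
        (fun (acc : List Int × List Int) p =>
          if p < first_pos_event_1 then (acc.1 ++ [p], acc.2) else (acc.1, acc.2 ++ [p]))
        ([], [])
      if acc.1.length > 0 then (-1, false, acc.2, acc.1)
      else ((acc.2.length : Int), false, acc.2, acc.1)
    | none => (-1, false, [], event_2_positions)
  | none => (0, true, [], [])

-- ===== PORT B =====
def template_precedence_data_alt (trace : List (String × List Int)) (event_set : List String) : Int × Bool × List Int × List Int :=
  let event_1 := event_set.getD 0 ""
  let event_2 := event_set.getD 1 ""
  match pvLookup trace event_2 with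
  | none => (0, true, [], [])
  | some positions =>
    match pvLookup trace event_1 with
    | none => (-1, false, [], positions)
    | some l1 =>
      let first := l1.headD 0
      -- stable sort by bool key: fulfillments (key false) first, violations after
      let keyed := PySem.List.sorted positions (fun p => decide (p < first)) false
      let split : Int := (positions.countP (fun p => decide (first ≤ p)) : Int)
      let fulfillments := PySem.List.slice keyed none (some split)
      let violations := PySem.List.slice keyed (some split) none
      if violations ≠ [] then (-1, false, fulfillments, violations)
      else ((fulfillments.length : Int), false, fulfillments, violations)

-- ===== PRECONDITION & SPEC =====
-- Pre_ excludes exactly where Python A raises: event_set of length ≠ 2 (AssertionError) and the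
-- case where both events are keys but trace[event_1] is empty (IndexError on [0]).
def Pre_template_precedence_data (trace : List (String × List Int)) (event_set : List String) : Prop :=
  event_set.length = 2 ∧
  ((pvLookup trace (event_set.getD 0 "")).isSome ∧ (pvLookup trace (event_set.getD 1 "")).isSome →
    (pvLookup trace (event_set.getD 0 "")).getD [] ≠ [])
instance (trace : List (String × List Int)) (event_set : List String) : Decidable (Pre_template_precedence_data trace event_set) := by unfold Pre_template_precedence_data; infer_instance
def pvWitness_template_precedence_data : (List (String × List Int)) × List String :=
  ([("a", [0]), ("b", [1, -1])], ["a", "b"])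

def Spec_template_precedence_data (trace : List (String × List Int)) (event_set : List String) (out : Int × Bool × List Int × List Int) : Prop := out = template_precedence_data_alt trace event_set
instance (trace : List (String × List Int)) (event_set : List String) (out : Int × Bool × List Int × List Int) : Decidable (Spec_template_precedence_data trace event_set out) := by unfold Spec_template_precedence_data; infer_instance

-- ===== CLAIM (what is proved, stated in full; the proofs are below) =====
def Claim_equal_template_precedence_data : Prop := ∀ (trace : List (String × List Int)) (event_set : List String), Dom_template_precedence_data trace event_set → Pre_template_precedence_data trace event_set → Spec_template_precedence_data trace event_set (template_precedence_data trace event_set)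

-- ===== LEMMAS AND PROOFS =====
-- insertBy places x after a block it never precedes and before a block it always precedes
theorem pv_insertBy_mid {α : Type} (before : α → α → Bool) (x : α) (F V : List α)
    (hF : ∀ y ∈ F, before x y = false) (hV : ∀ y ∈ V, before x y = true) :
    PySem.List.insertBy before x (F ++ V) = F ++ x :: V := by
  induction F with
  | nil =>
    cases V with
    | nil => simp [PySem.List.insertBy]
    | cons v V => simp [PySem.List.insertBy, hV v (by simp)]
  | cons f F ih =>
    have hf : before x f = false := hF f (by simp)
    simp only [List.cons_append, PySem.List.insertBy, hf]
    simp [ih (fun y hy => hF y (by simp [hy]))]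

-- the insertion-sort fold with a Bool key keeps false-keyed elements in front, true-keyed behind
theorem pv_foldl_insert_bool (key : Int → Bool) (xs F V : List Int)
    (hF : ∀ y ∈ F, key y = false) (hV : ∀ y ∈ V, key y = true) :
    xs.foldl (fun acc x => PySem.List.insertBy (fun a b => decide (key a < key b)) x acc) (F ++ V)
      = (F ++ xs.filter (fun p => !key p)) ++ (V ++ xs.filter key) := by
  induction xs generalizing F V with
  | nil => simp
  | cons x xs ih =>
    cases hx : key x with
    | true =>
      rw [List.foldl_cons,
        PySem.List.insertBy_of_forall_not_before _ _ _ (by intro y _; simp [hx]),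
        List.append_assoc, ih F (V ++ [x]) hF (by
          intro y hy; rcases List.mem_append.1 hy with h | h
          · exact hV y h
          · simp at h; simp [h, hx])]
      simp [hx]
    | false =>
      rw [List.foldl_cons,
        pv_insertBy_mid _ x F V (fun y hy => by simp [hx, hF y hy]) (fun y hy => by simp [hx, hV y hy])]
      have : F ++ x :: V = (F ++ [x]) ++ V := by simp
      rw [this, ih (F ++ [x]) V (by
          intro y hy; rcases List.mem_append.1 hy with h | h
          · exact hF y h
          · simp at h; simp [h, hx]) hV]
      simp [hx]

-- stable sort by a Bool key = stable partition
theorem pv_sorted_bool_partition (key : Int → Bool) (xs : List Int) :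
    PySem.List.sorted xs key false = xs.filter (fun p => !key p) ++ xs.filter key := by
  have := pv_foldl_insert_bool key xs [] [] (by simp) (by simp)
  simpa [PySem.List.sorted] using this

-- A's append-loop computes the two filters, in order.
theorem pv_partition_foldl (first : Int) (ps : List Int) (v f : List Int) :
    ps.foldl (fun (acc : List Int × List Int) p =>
      if p < first then (acc.1 ++ [p], acc.2) else (acc.1, acc.2 ++ [p])) (v, f)
    = (v ++ ps.filter (fun p => p < first), f ++ ps.filter (fun p => first ≤ p)) := by
  induction ps generalizing v f with
  | nil => simp
  | cons p ps ih =>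
    by_cases h : p < first
    · simp [List.foldl_cons, h, ih, not_le.mpr h]
    · simp [List.foldl_cons, h, ih, not_lt.mp h]

-- ===== VERDICT (by name: the statement is the Claim_ definition above) =====
theorem template_precedence_data_spec : Claim_equal_template_precedence_data := by
  intro trace event_set _ _
  unfold Spec_template_precedence_data template_precedence_data template_precedence_data_alt
  simp only [List.getD]
  cases h2 : pvLookup trace ((event_set[1]?).getD "") with
  | none => simp
  | some positions =>
    cases h1 : pvLookup trace ((event_set[0]?).getD "") with
    | none => simp
    | some l1 =>
      dsimp only
      rw [pv_partition_foldl, pv_sorted_bool_partition]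
      have hkey : ∀ g : Int, (fun p : Int => !decide (p < g)) = (fun p => decide (g ≤ p)) := by
        intro g; funext p
        by_cases h : p < g
        · simp [not_le.mpr h]; omega
        · simp [not_lt.mp h]
      rw [hkey]
      set F := positions.filter (fun p => decide (l1.headD 0 ≤ p)) with hF
      set V := positions.filter (fun p => decide (p < l1.headD 0)) with hV
      have hsplit : (positions.countP (fun p => decide (l1.headD 0 ≤ p)) : Int) = (F.length : Int) := by
        simp [hF, List.countP_eq_length_filter]
      have hcut1 : PySem.List.slice (F ++ V) none (some (F.length : Int)) = F := by
        rw [PySem.List.slice_to _ (by positivity)]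
        simp
      have hcut2 : PySem.List.slice (F ++ V) (some (F.length : Int)) none = V := by
        rw [PySem.List.slice_from _ (by positivity)]
        simp
      simp only [List.nil_append, hsplit, hcut1, hcut2]
      by_cases hv : V = []
      · simp [hv]
      · simp [hv, List.length_pos_iff.mpr hv]
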